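-- pv_equiv track=rewrite | github.com/byWhale/second-reader | reading-companion-backend/src/reading_runtime/llm_gateway.py | _pythonize_json_literals
-- ===== SOURCE A (Python) =====
-- def _pythonize_json_literals(text: str) -> str:
--     replacements = {"true": "True", "false": "False", "null": "None"}
--     chars: list[str] = []
--     quote: str | None = None
--     escaped = False
--     index = 0
--
--     while index < len(text):
--         char = text[index]
--         if quote is not None:
--             chars.append(char)
--             if escaped:
--                 escaped = False
--             elif char == "\\":
--                 escaped = True
--             elif char == quote:
--                 quote = None
--             index += 1
--             continue
--         if char in {'"', "'"}:
--             quote = char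
--             chars.append(char)
--             index += 1
--             continue
--         matched = False
--         for source, replacement in replacements.items():
--             if text.startswith(source, index):
--                 left_ok = index == 0 or not (text[index - 1].isalnum() or text[index - 1] == "_")
--                 right_index = index + len(source)
--                 right_ok = right_index >= len(text) or not (
--                     text[right_index].isalnum() or text[right_index] == "_"
--                 )
--                 if left_ok and right_ok:
--                     chars.append(replacement)
--                     index = right_index
--                     matched = True
--                     break
--         if matched:
--             continue
--         chars.append(char)
--         index += 1
--
--     return "".join(chars)
-- ===== SOURCE B (Python) =====
-- def _pythonize_json_literals(text: str) -> str:
--     mapping = {"true": "True", "false": "False", "null": "None"}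
--     out = []
--     i, n = 0, len(text)
--     while i < n:
--         ch = text[i]
--         if ch in '"\'':
--             j = i + 1
--             while j < n:
--                 if text[j] == '\\':
--                     j += 2
--                 elif text[j] == ch:
--                     j += 1
--                     break
--                 else:
--                     j += 1
--             out.append(text[i:j])
--             i = min(j, n)
--         elif ch.isalnum() or ch == '_':
--             j = i + 1
--             while j < n and (text[j].isalnum() or text[j] == '_'):
--                 j += 1
--             run = text[i:j]
--             out.append(mapping.get(run, run))
--             i = j
--         else:
--             out.append(ch)
--             i += 1
--     return ''.join(out)
-- ===== Notes on version B (the rewrite author's own statement) =====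
-- stated objective: alternative
-- what changed: Replaced A's per-character state machine (quote/escaped flags plus startswith probes with left/right context checks at every index) by a tokenizer: each iteration consumes a whole string token (scanning escapes pairwise) or a maximal identifier run that is looked up in the replacement dict, so no per-position keyword probing or context test remains.
import Mathlib
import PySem

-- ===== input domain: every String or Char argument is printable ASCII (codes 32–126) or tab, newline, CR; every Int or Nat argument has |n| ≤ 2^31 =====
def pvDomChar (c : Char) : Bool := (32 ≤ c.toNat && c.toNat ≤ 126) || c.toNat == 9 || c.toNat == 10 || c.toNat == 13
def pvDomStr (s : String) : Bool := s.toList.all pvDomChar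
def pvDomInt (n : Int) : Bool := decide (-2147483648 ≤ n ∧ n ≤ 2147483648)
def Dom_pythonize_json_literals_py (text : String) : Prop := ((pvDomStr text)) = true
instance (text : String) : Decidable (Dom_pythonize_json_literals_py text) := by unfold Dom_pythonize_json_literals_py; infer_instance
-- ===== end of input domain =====

set_option maxRecDepth 10000
set_option maxHeartbeats 1000000

-- B replaces A's per-character quote/escape state machine with a tokenizer over whole
-- string tokens and maximal word runs looked up in a dict (objective: alternative).


-- ===== PORT A =====
-- Python's `ch.isalnum() or ch == "_"` (exact on the ASCII domain)
def pvIsWord (c : Char) : Bool := c.isAlphanum || c == '_'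

-- `index == 0 or not (text[index-1].isalnum() or text[index-1] == "_")`
def pvLeftOk (prev : Option Char) : Bool :=
  match prev with
  | none => true
  | some c => !(pvIsWord c)

-- `right_index >= len(text) or not (text[right_index].isalnum() or ... == "_")`
def pvRightOk (l : List Char) : Bool :=
  match l with
  | [] => true
  | c :: _ => !(pvIsWord c)

-- the `for source, replacement in replacements.items()` loop, unrolled over the three
-- fixed dict entries in insertion order; returns (replacement chars, last char of the
-- matched source = text[right_index-1], the remaining text from right_index on)
def pvTryKeyword (prev : Option Char) (l : List Char) : Option (List Char × Char × List Char) :=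
  if ("true".toList.isPrefixOf l) && pvLeftOk prev && pvRightOk (l.drop 4) then
    some ("True".toList, 'e', l.drop 4)
  else if ("false".toList.isPrefixOf l) && pvLeftOk prev && pvRightOk (l.drop 5) then
    some ("False".toList, 'e', l.drop 5)
  else if ("null".toList.isPrefixOf l) && pvLeftOk prev && pvRightOk (l.drop 4) then
    some ("None".toList, 'l', l.drop 4)
  else none

-- the main `while index < len(text)` loop; the remaining text is `l`, the char
-- `text[index-1]` is carried as `prev` (none at index 0); every iteration consumes at
-- least one character, so `fuel = len(text)` iterations are exactly enough
def pvALoop (fuel : Nat) (quote : Option Char) (escaped : Bool) (prev : Option Char) (l : List Char) : List Char :=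
  match fuel, l with
  | 0, _ => []
  | _ + 1, [] => []
  | fuel + 1, c :: rest =>
    match quote with
    | some q =>
      if escaped then c :: pvALoop fuel (some q) false (some c) rest
      else if c = '\\' then c :: pvALoop fuel (some q) true (some c) rest
      else if c = q then c :: pvALoop fuel none false (some c) rest
      else c :: pvALoop fuel (some q) false (some c) rest
    | none =>
      if c = '"' || c = '\'' then c :: pvALoop fuel (some c) false (some c) rest
      else
        match pvTryKeyword prev (c :: rest) with
        | some out => out.1 ++ pvALoop fuel none false (some out.2.1) out.2.2
        | none => c :: pvALoop fuel none false (some c) rest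

def pythonize_json_literals_py (text : String) : String :=
  String.mk (pvALoop text.toList.length none false none text.toList)

-- ===== PORT B =====
-- `mapping.get(run, run)`
def pvRunMap (run : List Char) : List Char :=
  if run = "true".toList then "True".toList
  else if run = "false".toList then "False".toList
  else if run = "null".toList then "None".toList
  else run

-- the inner `while j < n` string scan: returns the token after the opening
-- quote (through the closing quote, if any) and the remaining text
def pvScanStr (q : Char) (l : List Char) : List Char × List Char :=
  match l with
  | [] => ([], [])
  | c :: rest =>
    if c = '\\' then
      match rest with
      | [] => ([c], [])
      | d :: rest' => (c :: d :: (pvScanStr q rest').1, (pvScanStr q rest').2)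
    else if c = q then ([c], rest)
    else (c :: (pvScanStr q rest).1, (pvScanStr q rest).2)

-- the outer `while i < n` token loop; every iteration consumes at least one
-- character, so `fuel = len(text)` iterations are exactly enough
def pvBLoop (fuel : Nat) (l : List Char) : List Char :=
  match fuel, l with
  | 0, _ => []
  | _ + 1, [] => []
  | fuel + 1, c :: rest =>
    if c = '"' || c = '\'' then
      c :: ((pvScanStr c rest).1 ++ pvBLoop fuel (pvScanStr c rest).2)
    else if pvIsWord c then
      pvRunMap ((c :: rest).takeWhile pvIsWord) ++ pvBLoop fuel ((c :: rest).dropWhile pvIsWord)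
    else c :: pvBLoop fuel rest

def pythonize_json_literals_py_alt (text : String) : String :=
  String.mk (pvBLoop text.toList.length text.toList)

-- ===== PRECONDITION & SPEC =====
def Spec_pythonize_json_literals_py (text : String) (out : String) : Prop := out = pythonize_json_literals_py_alt text
instance (text : String) (out : String) : Decidable (Spec_pythonize_json_literals_py text out) := by unfold Spec_pythonize_json_literals_py; infer_instance

-- ===== CLAIM (what is proved, stated in full; the proofs are below) =====
def Claim_equal_pythonize_json_literals_py : Prop := ∀ (text : String), Dom_pythonize_json_literals_py text → Spec_pythonize_json_literals_py text (pythonize_json_literals_py text)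

-- ===== LEMMAS AND PROOFS =====

theorem pvALoop_nil (f : Nat) (q : Option Char) (e : Bool) (p : Option Char) :
    pvALoop f q e p [] = [] := by
  cases f <;> rfl

theorem pvBLoop_nil (f : Nat) : pvBLoop f [] = [] := by
  cases f <;> rfl

theorem pvALoop_quote_cons (f : Nat) (q : Char) (esc : Bool) (prev : Option Char) (c : Char) (rest : List Char) :
    pvALoop (f + 1) (some q) esc prev (c :: rest) =
      (if esc then c :: pvALoop f (some q) false (some c) rest
       else if c = '\\' then c :: pvALoop f (some q) true (some c) rest
       else if c = q then c :: pvALoop f none false (some c) rest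
       else c :: pvALoop f (some q) false (some c) rest) := rfl

theorem pvALoop_none_cons (f : Nat) (prev : Option Char) (c : Char) (rest : List Char) :
    pvALoop (f + 1) none false prev (c :: rest) =
      (if c = '"' || c = '\'' then c :: pvALoop f (some c) false (some c) rest
       else match pvTryKeyword prev (c :: rest) with
        | some out => out.1 ++ pvALoop f none false (some out.2.1) out.2.2
        | none => c :: pvALoop f none false (some c) rest) := rfl

theorem pvALoop_quote_branch {c : Char} {rest : List Char} (f : Nat) (prev : Option Char)
    (hq : (c = '"' || c = '\'') = true) :
    pvALoop (f + 1) none false prev (c :: rest) = c :: pvALoop f (some c) false (some c) rest := by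
  rw [pvALoop_none_cons, if_pos hq]

theorem pvALoop_kw_branch {prev : Option Char} {c : Char} {rest : List Char}
    {out : List Char × Char × List Char} (f : Nat)
    (hqb : (c = '"' || c = '\'') = false) (hk : pvTryKeyword prev (c :: rest) = some out) :
    pvALoop (f + 1) none false prev (c :: rest) = out.1 ++ pvALoop f none false (some out.2.1) out.2.2 := by
  rw [pvALoop_none_cons, if_neg (by simp [hqb]), hk]

theorem pvALoop_nokw_branch {prev : Option Char} {c : Char} {rest : List Char} (f : Nat)
    (hqb : (c = '"' || c = '\'') = false) (hk : pvTryKeyword prev (c :: rest) = none) :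
    pvALoop (f + 1) none false prev (c :: rest) = c :: pvALoop f none false (some c) rest := by
  rw [pvALoop_none_cons, if_neg (by simp [hqb]), hk]

theorem pvBLoop_cons (f : Nat) (c : Char) (rest : List Char) :
    pvBLoop (f + 1) (c :: rest) =
      (if c = '"' || c = '\'' then
        c :: ((pvScanStr c rest).1 ++ pvBLoop f (pvScanStr c rest).2)
      else if pvIsWord c then
        pvRunMap ((c :: rest).takeWhile pvIsWord) ++ pvBLoop f ((c :: rest).dropWhile pvIsWord)
      else c :: pvBLoop f rest) := rfl

theorem pvScanStr_cons (q c : Char) (rest : List Char) :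
    pvScanStr q (c :: rest) =
      (if c = '\\' then
        match rest with
        | [] => ([c], [])
        | d :: rest' => (c :: d :: (pvScanStr q rest').1, (pvScanStr q rest').2)
      else if c = q then ([c], rest)
      else (c :: (pvScanStr q rest).1, (pvScanStr q rest).2)) := by
  rw [pvScanStr.eq_def]


theorem pvScanStr_parts : ∀ (n : Nat) (q : Char) (l : List Char), l.length ≤ n →
    (pvScanStr q l).1.length + (pvScanStr q l).2.length = l.length := by
  intro n
  induction n with
  | zero =>
    intro q l h
    have : l = [] := by cases l with | nil => rfl | cons a b => simp at h
    subst this; simp [pvScanStr]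
  | succ n ih =>
    intro q l h
    cases l with
    | nil => simp [pvScanStr]
    | cons c rest =>
      rw [pvScanStr_cons]
      by_cases hb : c = '\\'
      · rw [if_pos hb]
        cases rest with
        | nil => simp
        | cons d rest' =>
          have := ih q rest' (by simp at h; omega)
          simp
          omega
      · rw [if_neg hb]
        by_cases hq : c = q
        · rw [if_pos hq]; simp only [List.length_cons, List.length_nil]; omega
        · rw [if_neg hq]
          have := ih q rest (by simp at h; omega)
          simp
          omega

theorem pv_prefix_head {d c : Char} {l2 rest : List Char}
    (h : (d :: l2).isPrefixOf (c :: rest) = true) : d = c := by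
  simp [List.isPrefixOf] at h
  exact h.1

theorem pv_prefix_drop_eq {p l : List Char} (h : p.isPrefixOf l = true) :
    l = p ++ l.drop p.length := by
  obtain ⟨t, ht⟩ := List.isPrefixOf_iff_prefix.1 h
  rw [← ht, List.drop_left]

theorem pvTryKeyword_noleft (prev : Option Char) (l : List Char) (h : pvLeftOk prev = false) :
    pvTryKeyword prev l = none := by
  unfold pvTryKeyword; simp [h]

theorem pvTryKeyword_notword (prev : Option Char) (c : Char) (rest : List Char)
    (h : pvIsWord c = false) : pvTryKeyword prev (c :: rest) = none := by
  unfold pvTryKeyword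
  split_ifs with h1 h2 h3
  · exfalso
    simp only [Bool.and_eq_true] at h1
    have := pv_prefix_head (show ('t' :: "rue".toList).isPrefixOf (c :: rest) = true from h1.1.1)
    subst this; simp [pvIsWord] at h
  · exfalso
    simp only [Bool.and_eq_true] at h2
    have := pv_prefix_head (show ('f' :: "alse".toList).isPrefixOf (c :: rest) = true from h2.1.1)
    subst this; simp [pvIsWord] at h
  · exfalso
    simp only [Bool.and_eq_true] at h3
    have := pv_prefix_head (show ('n' :: "ull".toList).isPrefixOf (c :: rest) = true from h3.1.1)
    subst this; simp [pvIsWord] at h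
  · rfl

theorem pv_takeWhile_prefix : ∀ (p t : List Char), (∀ c ∈ p, pvIsWord c = true) →
    pvRightOk t = true →
    (p ++ t).takeWhile pvIsWord = p ∧ (p ++ t).dropWhile pvIsWord = t := by
  intro p
  induction p with
  | nil =>
    intro t _ hr
    cases t with
    | nil => simp
    | cons c r =>
      have hc : pvIsWord c = false := by simpa [pvRightOk] using hr
      simp [List.takeWhile_cons, List.dropWhile_cons, hc]
  | cons c p' ih =>
    intro t hw hr
    have hc : pvIsWord c = true := hw c (by simp)
    have h2 := ih t (fun d hd => hw d (by simp [hd])) hr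
    simp [List.takeWhile_cons, List.dropWhile_cons, hc, h2.1, h2.2]

theorem pv_dropWhile_head_not : ∀ (l : List Char) {c : Char} {rest : List Char},
    l.dropWhile pvIsWord = c :: rest → pvIsWord c = false := by
  intro l
  induction l with
  | nil => intro c r h; simp at h
  | cons a l' ih =>
    intro c r h
    by_cases ha : pvIsWord a = true
    · rw [List.dropWhile_cons, if_pos ha] at h; exact ih h
    · rw [List.dropWhile_cons, if_neg ha] at h
      cases h
      simpa using ha

theorem pv_rightOk_iff {t : List Char} (h : pvRightOk t = true) :
    ∀ c rest, t = c :: rest → pvIsWord c = false := by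
  intro c rest ht
  subst ht
  simpa [pvRightOk] using h

theorem pv_len_split (rest : List Char) :
    (rest.takeWhile pvIsWord).length + (rest.dropWhile pvIsWord).length = rest.length := by
  have := congrArg List.length (List.takeWhile_append_dropWhile (p := pvIsWord) (l := rest))
  rw [List.length_append] at this
  exact this

-- A in quote mode consumes exactly B's string token, one fuel step per character
theorem pvALoop_string : ∀ (n : Nat) (q : Char) (l : List Char) (prev : Option Char),
    l.length ≤ n → ∀ (f : Nat),
    pvALoop ((pvScanStr q l).1.length + f) (some q) false prev l =
      (pvScanStr q l).1 ++ pvALoop f none false (some q) (pvScanStr q l).2 := by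
  intro n
  induction n with
  | zero =>
    intro q l prev h f
    have : l = [] := by cases l with | nil => rfl | cons a b => simp at h
    subst this; simp [pvScanStr, pvALoop_nil]
  | succ n ih =>
    intro q l prev h f
    cases l with
    | nil => simp [pvScanStr, pvALoop_nil]
    | cons c rest =>
      rw [pvScanStr_cons]
      by_cases hb : c = '\\'
      · rw [if_pos hb]
        cases rest with
        | nil =>
          rw [show ([c] : List Char).length + f = f + 1 by simp only [List.length_cons, List.length_nil]; omega]
          rw [pvALoop_quote_cons, if_neg (show ¬(false = true) by simp), if_pos hb]
          simp [pvALoop_nil]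
        | cons d rest' =>
          rw [show (c :: d :: (pvScanStr q rest').1).length + f =
              (((pvScanStr q rest').1.length + f) + 1) + 1 by simp only [List.length_cons]; omega]
          rw [pvALoop_quote_cons, if_neg (show ¬(false = true) by simp), if_pos hb]
          rw [pvALoop_quote_cons, if_pos rfl]
          rw [ih q rest' (some d) (by simp at h; omega) f]
          simp
      · rw [if_neg hb]
        by_cases hq : c = q
        · subst hq
          rw [if_pos rfl]
          rw [show ([c] : List Char).length + f = f + 1 by simp only [List.length_cons, List.length_nil]; omega]
          rw [pvALoop_quote_cons, if_neg (show ¬(false = true) by simp), if_neg hb, if_pos rfl]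
          simp
        · rw [if_neg hq]
          rw [show (c :: (pvScanStr q rest).1).length + f =
              ((pvScanStr q rest).1.length + f) + 1 by simp only [List.length_cons]; omega]
          rw [pvALoop_quote_cons, if_neg (show ¬(false = true) by simp), if_neg hb, if_neg hq]
          rw [ih q rest (some c) (by simp at h; omega) f]
          simp

-- with a word character on the left, A copies a maximal word run verbatim
theorem pvALoop_run : ∀ (n : Nat) (l : List Char) (w : Char), l.length ≤ n →
    pvIsWord w = true →
    ∃ w', pvIsWord w' = true ∧ ∀ (f : Nat),
      pvALoop ((l.takeWhile pvIsWord).length + f) none false (some w) l =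
        l.takeWhile pvIsWord ++ pvALoop f none false (some w') (l.dropWhile pvIsWord) := by
  intro n
  induction n with
  | zero =>
    intro l w h hw
    have : l = [] := by cases l with | nil => rfl | cons a b => simp at h
    subst this
    exact ⟨w, hw, fun f => by simp [pvALoop_nil]⟩
  | succ n ih =>
    intro l w h hw
    cases l with
    | nil => exact ⟨w, hw, fun f => by simp [pvALoop_nil]⟩
    | cons c rest =>
      by_cases hc : pvIsWord c = true
      · have hq1 : c ≠ '"' := by intro hx; subst hx; simp [pvIsWord] at hc
        have hq2 : c ≠ '\'' := by intro hx; subst hx; simp [pvIsWord] at hc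
        have hqb : (c = '"' || c = '\'') = false := by simp [hq1, hq2]
        have hnone := pvTryKeyword_noleft (some w) (c :: rest) (by simp [pvLeftOk, hw])
        obtain ⟨w', hw', heq⟩ := ih rest c (by simp at h; omega) hc
        refine ⟨w', hw', fun f => ?_⟩
        have harr : ((c :: rest).takeWhile pvIsWord).length + f =
            ((rest.takeWhile pvIsWord).length + f) + 1 := by
          rw [List.takeWhile_cons, if_pos hc]; simp only [List.length_cons]; omega
        rw [harr, pvALoop_nokw_branch _ hqb hnone, heq f]
        rw [List.takeWhile_cons, if_pos hc, List.dropWhile_cons, if_pos hc]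
        simp
      · refine ⟨w, hw, fun f => ?_⟩
        rw [List.takeWhile_cons, if_neg hc, List.dropWhile_cons, if_neg hc]
        simp

theorem pv_main : ∀ (n : Nat) (l : List Char) (prev : Option Char) (f g : Nat),
    l.length ≤ n → l.length ≤ f → l.length ≤ g →
    (pvLeftOk prev = true ∨ ∀ c rest, l = c :: rest → pvIsWord c = false) →
    pvALoop f none false prev l = pvBLoop g l := by
  intro n
  induction n with
  | zero =>
    intro l prev f g h hf hg _
    have : l = [] := by cases l with | nil => rfl | cons a b => simp at h
    subst this; simp [pvALoop_nil, pvBLoop_nil]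
  | succ n ih =>
    intro l prev f g h hf hg hyp
    cases l with
    | nil => simp [pvALoop_nil, pvBLoop_nil]
    | cons c rest =>
      have hlen : rest.length ≤ n := by simp at h; omega
      rcases f with _ | f1
      · simp only [List.length_cons] at hf; omega
      rcases g with _ | g1
      · simp only [List.length_cons] at hg; omega
      have hf1 : rest.length ≤ f1 := by simp at hf; omega
      have hg1 : rest.length ≤ g1 := by simp at hg; omega
      by_cases hq : (c = '"' ∨ c = '\'')
      · have hqw : pvIsWord c = false := by
          rcases hq with hq | hq <;> subst hq <;> simp [pvIsWord]
        have hqB : (c = '"' || c = '\'') = true := by simp [hq]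
        rw [pvALoop_quote_branch f1 prev hqB, pvBLoop_cons, if_pos hqB]
        have hparts := pvScanStr_parts rest.length c rest le_rfl
        have hfs : f1 = (pvScanStr c rest).1.length + (f1 - (pvScanStr c rest).1.length) := by
          omega
        rw [hfs, pvALoop_string n c rest (some c) hlen]
        rw [ih (pvScanStr c rest).2 (some c) (f1 - (pvScanStr c rest).1.length) g1
          (by omega) (by omega) (by omega) (Or.inl (by simp [pvLeftOk, hqw]))]
      · have hqb : (c = '"' || c = '\'') = false := by
          simp only [Bool.or_eq_false_iff, decide_eq_false_iff_not]
          exact ⟨fun hx => hq (Or.inl hx), fun hx => hq (Or.inr hx)⟩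
        by_cases hw : pvIsWord c = true
        · have hl : pvLeftOk prev = true := by
            rcases hyp with hl | hr
            · exact hl
            · exact absurd (hr c rest rfl) (by simp [hw])
          cases hk : pvTryKeyword prev (c :: rest) with
          | some out =>
            rw [pvALoop_kw_branch f1 hqb hk, pvBLoop_cons]
            rw [if_neg (show ¬((c = '"' || c = '\'') = true) by simp [hqb]), if_pos hw]
            unfold pvTryKeyword at hk
            split_ifs at hk with h1 h2 h3
            · cases hk
              simp only [Bool.and_eq_true] at h1
              have hsplit := pv_prefix_drop_eq h1.1.1
              have htw := pv_takeWhile_prefix "true".toList ((c :: rest).drop "true".toList.length)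
                (by intro d hd; rw [show "true".toList = ['t','r','u','e'] from rfl] at hd; simp at hd; rcases hd with rfl|rfl|rfl|rfl <;> rfl)
                (by rw [show "true".toList.length = 4 from rfl]; exact h1.2)
              rw [show "true".toList.length = 4 from rfl] at hsplit htw
              conv_rhs => rw [hsplit]
              rw [htw.1, htw.2]
              rw [show pvRunMap "true".toList = "True".toList from by simp [pvRunMap]]
              simp only [List.append_cancel_left_eq]
              exact ih ((c :: rest).drop 4) (some 'e') f1 g1 (by simp at h ⊢; omega)
                (by simp at hf ⊢; omega) (by simp at hg ⊢; omega) (Or.inr (pv_rightOk_iff h1.2))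
            · cases hk
              simp only [Bool.and_eq_true] at h2
              have hsplit := pv_prefix_drop_eq h2.1.1
              have htw := pv_takeWhile_prefix "false".toList ((c :: rest).drop "false".toList.length)
                (by intro d hd; rw [show "false".toList = ['f','a','l','s','e'] from rfl] at hd; simp at hd; rcases hd with rfl|rfl|rfl|rfl|rfl <;> rfl)
                (by rw [show "false".toList.length = 5 from rfl]; exact h2.2)
              rw [show "false".toList.length = 5 from rfl] at hsplit htw
              conv_rhs => rw [hsplit]
              rw [htw.1, htw.2]
              rw [show pvRunMap "false".toList = "False".toList from by simp [pvRunMap]]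
              simp only [List.append_cancel_left_eq]
              exact ih ((c :: rest).drop 5) (some 'e') f1 g1 (by simp at h ⊢; omega)
                (by simp at hf ⊢; omega) (by simp at hg ⊢; omega) (Or.inr (pv_rightOk_iff h2.2))
            · cases hk
              simp only [Bool.and_eq_true] at h3
              have hsplit := pv_prefix_drop_eq h3.1.1
              have htw := pv_takeWhile_prefix "null".toList ((c :: rest).drop "null".toList.length)
                (by intro d hd; rw [show "null".toList = ['n','u','l','l'] from rfl] at hd; simp at hd; rcases hd with rfl|rfl|rfl|rfl <;> rfl)
                (by rw [show "null".toList.length = 4 from rfl]; exact h3.2)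
              rw [show "null".toList.length = 4 from rfl] at hsplit htw
              conv_rhs => rw [hsplit]
              rw [htw.1, htw.2]
              rw [show pvRunMap "null".toList = "None".toList from by simp [pvRunMap]]
              simp only [List.append_cancel_left_eq]
              exact ih ((c :: rest).drop 4) (some 'l') f1 g1 (by simp at h ⊢; omega)
                (by simp at hf ⊢; omega) (by simp at hg ⊢; omega) (Or.inr (pv_rightOk_iff h3.2))
          | none =>
            -- the maximal run is not a keyword, so A copies it and B maps it to itself
            have hright : pvRightOk ((c :: rest).dropWhile pvIsWord) = true := by
              cases hd : (c :: rest).dropWhile pvIsWord with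
              | nil => simp [pvRightOk]
              | cons d r => simp [pvRightOk, pv_dropWhile_head_not (c :: rest) hd]
            have hnotkw : pvRunMap ((c :: rest).takeWhile pvIsWord) =
                (c :: rest).takeWhile pvIsWord := by
              unfold pvRunMap
              split_ifs with k1 k2 k3
              · exfalso
                have hsplit : (c :: rest) = "true".toList ++ (c :: rest).dropWhile pvIsWord := by
                  conv_lhs => rw [← List.takeWhile_append_dropWhile (p := pvIsWord) (l := c :: rest)]
                  rw [k1]
                have hpre : "true".toList.isPrefixOf (c :: rest) = true := by
                  rw [List.isPrefixOf_iff_prefix]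
                  exact ⟨(c :: rest).dropWhile pvIsWord, hsplit.symm⟩
                have hdrop : List.drop 4 (c :: rest) = (c :: rest).dropWhile pvIsWord := by
                  conv_lhs => rw [hsplit, show "true".toList = ['t','r','u','e'] from rfl]
                  rfl
                unfold pvTryKeyword at hk
                rw [if_pos (by rw [hdrop, hpre, hl, hright]; rfl)] at hk
                cases hk
              · exfalso
                have hsplit : (c :: rest) = "false".toList ++ (c :: rest).dropWhile pvIsWord := by
                  conv_lhs => rw [← List.takeWhile_append_dropWhile (p := pvIsWord) (l := c :: rest)]
                  rw [k2]
                have hpre : "false".toList.isPrefixOf (c :: rest) = true := by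
                  rw [List.isPrefixOf_iff_prefix]
                  exact ⟨(c :: rest).dropWhile pvIsWord, hsplit.symm⟩
                have hc : c = 'f' :=
                  (pv_prefix_head (show ('f' :: "alse".toList).isPrefixOf (c :: rest) = true from hpre)).symm
                subst hc
                have hdrop : List.drop 5 ('f' :: rest) = ('f' :: rest).dropWhile pvIsWord := by
                  conv_lhs => rw [hsplit, show "false".toList = ['f','a','l','s','e'] from rfl]
                  rfl
                unfold pvTryKeyword at hk
                rw [if_neg, if_pos (by rw [hdrop, hpre, hl, hright]; rfl)] at hk
                · cases hk
                · intro hcon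
                  simp only [Bool.and_eq_true] at hcon
                  have := pv_prefix_head (show ('t' :: "rue".toList).isPrefixOf ('f' :: rest) = true from hcon.1.1)
                  simp at this
              · exfalso
                have hsplit : (c :: rest) = "null".toList ++ (c :: rest).dropWhile pvIsWord := by
                  conv_lhs => rw [← List.takeWhile_append_dropWhile (p := pvIsWord) (l := c :: rest)]
                  rw [k3]
                have hpre : "null".toList.isPrefixOf (c :: rest) = true := by
                  rw [List.isPrefixOf_iff_prefix]
                  exact ⟨(c :: rest).dropWhile pvIsWord, hsplit.symm⟩
                have hc : c = 'n' :=
                  (pv_prefix_head (show ('n' :: "ull".toList).isPrefixOf (c :: rest) = true from hpre)).symm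
                subst hc
                have hdrop : List.drop 4 ('n' :: rest) = ('n' :: rest).dropWhile pvIsWord := by
                  conv_lhs => rw [hsplit, show "null".toList = ['n','u','l','l'] from rfl]
                  rfl
                unfold pvTryKeyword at hk
                rw [if_neg, if_neg, if_pos (by rw [hdrop, hpre, hl, hright]; rfl)] at hk
                · cases hk
                · intro hcon
                  simp only [Bool.and_eq_true] at hcon
                  have := pv_prefix_head (show ('f' :: "alse".toList).isPrefixOf ('n' :: rest) = true from hcon.1.1)
                  simp at this
                · intro hcon
                  simp only [Bool.and_eq_true] at hcon
                  have := pv_prefix_head (show ('t' :: "rue".toList).isPrefixOf ('n' :: rest) = true from hcon.1.1)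
                  simp at this
              · rfl
            rw [pvALoop_nokw_branch f1 hqb hk, pvBLoop_cons]
            rw [if_neg (show ¬((c = '"' || c = '\'') = true) by simp [hqb]), if_pos hw]
            obtain ⟨w', hw', heq⟩ := pvALoop_run n rest c hlen hw
            have htwdw := pv_len_split rest
            have hfsplit : f1 = (rest.takeWhile pvIsWord).length + (f1 - (rest.takeWhile pvIsWord).length) := by
              omega
            rw [hfsplit, heq, hnotkw]
            rw [List.takeWhile_cons, if_pos hw, List.dropWhile_cons, if_pos hw]
            rw [ih (rest.dropWhile pvIsWord) (some w') (f1 - (rest.takeWhile pvIsWord).length) g1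
              (by omega) (by omega) (by omega)
              (Or.inr (fun d r hd => pv_dropWhile_head_not rest hd))]
            simp
        · have hw' : pvIsWord c = false := by simpa using hw
          have hnone := pvTryKeyword_notword prev c rest hw'
          rw [pvALoop_nokw_branch f1 hqb hnone, pvBLoop_cons]
          rw [if_neg (show ¬((c = '"' || c = '\'') = true) by simp [hqb]), if_neg hw]
          rw [ih rest (some c) f1 g1 hlen hf1 hg1 (Or.inl (by simp [pvLeftOk, hw']))]

-- ===== VERDICT (by name: the statement is the Claim_ definition above) =====
theorem pythonize_json_literals_py_spec : Claim_equal_pythonize_json_literals_py := by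
  intro text _
  unfold Spec_pythonize_json_literals_py pythonize_json_literals_py pythonize_json_literals_py_alt
  rw [pv_main text.toList.length text.toList none text.toList.length text.toList.length
    le_rfl le_rfl le_rfl (Or.inl rfl)]
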